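-- pv_equiv track=rewrite | github.com/michaelabix/adventofcode2022 | 01/day01.py | find_totals
-- ===== SOURCE A (Python) =====
-- def find_totals(calories: list) -> int:
--     """find total calories per elf"""
--     totals = []
--     temp_int = 0
--
--     #do some math and append
--     for c in calories:
--         if c != 0:
--             temp_int += c
--         else:
--             totals.append(temp_int)
--             temp_int = 0
--
--     #for the last set of calories
--     totals.append(temp_int)
--
--     #sort highest to lowest
--     totals.sort(reverse=True)
--
--     return totals
-- ===== SOURCE B (Python) =====
-- def find_totals(calories: list) -> int:
--     """find total calories per elf"""
--     # staged passes: locate separator positions, then sum each segment by slicing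
--     zeros = [i for i, c in enumerate(calories) if c == 0]
--     bounds = [-1] + zeros + [len(calories)]
--     totals = [sum(calories[a + 1:b]) for a, b in zip(bounds, bounds[1:])]
--     return sorted(totals, reverse=True)
-- ===== Notes on version B (the rewrite author's own statement) =====
-- stated objective: alternative
-- what changed: Replaces A's single inline accumulator pass by staged passes: first scan for the indices of the zero separators, build a boundary list, then compute one total per adjacent boundary pair by summing a slice, then sort descending.
import Mathlib
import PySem

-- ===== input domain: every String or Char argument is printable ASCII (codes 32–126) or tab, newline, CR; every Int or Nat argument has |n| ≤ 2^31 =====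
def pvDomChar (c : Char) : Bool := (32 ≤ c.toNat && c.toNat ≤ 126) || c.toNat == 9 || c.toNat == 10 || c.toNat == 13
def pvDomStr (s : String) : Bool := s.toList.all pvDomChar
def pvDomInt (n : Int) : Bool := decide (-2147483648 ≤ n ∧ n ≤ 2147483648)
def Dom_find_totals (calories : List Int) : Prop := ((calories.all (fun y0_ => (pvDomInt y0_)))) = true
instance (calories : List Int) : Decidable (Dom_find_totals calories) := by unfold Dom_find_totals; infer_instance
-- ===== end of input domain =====

-- B replaces A's single accumulator pass by staged passes (find zero indices, build boundary list, sum slices between adjacent boundaries); same results, same cost (objective: alternative).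

-- ===== PORT A =====
-- forward loop: state = (totals so far, running sum); zero flushes the running sum
def find_totals (calories : List Int) : List Int :=
  let p := calories.foldl
    (fun (st : List Int × Int) c =>
      if c ≠ 0 then (st.1, st.2 + c) else (st.1 ++ [st.2], (0 : Int)))
    ([], 0)
  PySem.List.sorted (p.1 ++ [p.2]) (fun x => x) true

-- ===== PORT B =====
-- staged passes: zeros = indices of separators, bounds = -1 :: zeros ++ [len], one slice sum per adjacent pair
def find_totals_alt (calories : List Int) : List Int :=
  let zeros := (PySem.List.enumerate calories 0).filterMap
    (fun p => if p.2 = 0 then some p.1 else none)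
  let bounds := (-1 : Int) :: (zeros ++ [(calories.length : Int)])
  let totals := (bounds.zip bounds.tail).map
    (fun p => (PySem.List.slice calories (some (p.1 + 1)) (some p.2)).sum)
  PySem.List.sorted totals (fun x => x) true

-- ===== PRECONDITION & SPEC =====
def Spec_find_totals (calories : List Int) (out : List Int) : Prop := out = find_totals_alt calories
instance (calories : List Int) (out : List Int) : Decidable (Spec_find_totals calories out) := by unfold Spec_find_totals; infer_instance

-- ===== CLAIM (what is proved, stated in full; the proofs are below) =====
def Claim_equal_find_totals : Prop := ∀ (calories : List Int), Dom_find_totals calories → Spec_find_totals calories (find_totals calories)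

-- ===== LEMMAS AND PROOFS =====

-- A's loop step
def pvStepA (st : List Int × Int) (c : Int) : List Int × Int :=
  if c ≠ 0 then (st.1, st.2 + c) else (st.1 ++ [st.2], (0 : Int))

-- common recursive spec of the unsorted totals (front group first)
def pvGroups : List Int → List Int
  | [] => [0]
  | c :: xs => if c = 0 then 0 :: pvGroups xs else
      match pvGroups xs with
      | t :: ts => (t + c) :: ts
      | [] => []

def pvAddFirst (t : Int) : List Int → List Int
  | [] => []
  | s :: ss => (t + s) :: ss

-- B's zeros pass and unsorted totals as named functions
def pvZeros (xs : List Int) (s : Int) : List Int :=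
  (PySem.List.enumerate xs s).filterMap (fun p => if p.2 = 0 then some p.1 else none)

def pvTotB (xs : List Int) : List Int :=
  let bounds := (-1 : Int) :: (pvZeros xs 0 ++ [(xs.length : Int)])
  (bounds.zip bounds.tail).map
    (fun p => (PySem.List.slice xs (some (p.1 + 1)) (some p.2)).sum)

lemma pvGroups_ne_nil (xs : List Int) : pvGroups xs ≠ [] := by
  induction xs with
  | nil => simp [pvGroups]
  | cons c xs ih =>
    simp only [pvGroups]
    by_cases hc : c = 0
    · simp [hc]
    · cases h : pvGroups xs with
      | nil => exact absurd h ih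
      | cons t ts => simp [hc]

-- A side: fold = pvGroups
lemma pvA_key (rest ts : List Int) (t : Int) :
    (rest.foldl pvStepA (ts, t)).1 ++ [(rest.foldl pvStepA (ts, t)).2]
      = ts ++ pvAddFirst t (pvGroups rest) := by
  induction rest generalizing ts t with
  | nil => simp [pvGroups, pvAddFirst]
  | cons c rest ih =>
    simp only [List.foldl_cons, pvGroups]
    by_cases hc : c = 0
    · have hstep : pvStepA (ts, t) c = (ts ++ [t], (0 : Int)) := by
        simp [pvStepA, hc]
      rw [hstep, ih]
      cases h : pvGroups rest with
      | nil => exact absurd h (pvGroups_ne_nil rest)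
      | cons s ss => simp [hc, pvAddFirst]
    · have hstep : pvStepA (ts, t) c = (ts, t + c) := by
        simp [pvStepA, hc]
      rw [hstep, ih]
      cases h : pvGroups rest with
      | nil => exact absurd h (pvGroups_ne_nil rest)
      | cons s ss =>
        simp only [hc, if_false, pvAddFirst]
        have : t + c + s = t + (s + c) := by ring
        rw [this]

lemma pvA_unsorted (calories : List Int) :
    (calories.foldl pvStepA ([], 0)).1 ++ [(calories.foldl pvStepA ([], 0)).2]
      = pvGroups calories := by
  rw [pvA_key]
  cases h : pvGroups calories with
  | nil => exact absurd h (pvGroups_ne_nil calories)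
  | cons s ss => simp [pvAddFirst]

-- B side lemmas
lemma pvZeros_cons' (c : Int) (xs : List Int) (s : Int) :
    pvZeros (c :: xs) s = (if c = 0 then [s] else []) ++ pvZeros xs (s + 1) := by
  simp only [pvZeros, PySem.List.enumerate_cons, List.filterMap_cons]
  by_cases hc : c = 0 <;> simp [hc]

lemma pvZeros_shift (xs : List Int) (s : Int) :
    pvZeros xs (s + 1) = (pvZeros xs s).map (· + 1) := by
  induction xs generalizing s with
  | nil => simp [pvZeros, PySem.List.enumerate_nil]
  | cons c xs ih =>
    rw [pvZeros_cons', pvZeros_cons', ih (s + 1), List.map_append]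
    by_cases hc : c = 0 <;> simp [hc]

lemma pvZeros_cons (c : Int) (xs : List Int) :
    pvZeros (c :: xs) 0 =
      (if c = 0 then [(0 : Int)] else []) ++ (pvZeros xs 0).map (· + 1) := by
  rw [pvZeros_cons', (by norm_num : (0 : Int) + 1 = 0 + 1), pvZeros_shift]

lemma pvZeros_nonneg (xs : List Int) (s : Int) : ∀ z ∈ pvZeros xs s, s ≤ z := by
  induction xs generalizing s with
  | nil => simp [pvZeros, PySem.List.enumerate_nil]
  | cons c xs ih =>
    intro z hz
    rw [pvZeros_cons'] at hz
    rcases List.mem_append.mp hz with h | h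
    · split_ifs at h with hc
      · simp at h; omega
      · simp at h
    · have := ih (s + 1) z h; omega

lemma pvSliceCons (xs : List Int) (c a b : Int) (ha : 0 ≤ a) (hb : 0 ≤ b) :
    PySem.List.slice (c :: xs) (some (a + 1)) (some (b + 1))
      = PySem.List.slice xs (some a) (some b) := by
  rw [PySem.List.slice_toNat _ (by omega) (by omega),
      PySem.List.slice_toNat _ ha hb]
  have h1 : (a + 1).toNat = a.toNat + 1 := by omega
  have h2 : (b + 1).toNat - (a + 1).toNat = b.toNat - a.toNat := by omega
  rw [h1] at h2 ⊢
  rw [h2, List.drop_succ_cons]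

lemma pvSliceConsHead (xs : List Int) (c b : Int) (hb : 0 ≤ b) :
    PySem.List.slice (c :: xs) (some 0) (some (b + 1))
      = c :: PySem.List.slice xs (some 0) (some b) := by
  rw [PySem.List.slice_toNat _ (by omega) (by omega),
      PySem.List.slice_toNat _ (by omega) hb]
  have h1 : (b + 1).toNat = b.toNat + 1 := by omega
  simp [h1, List.take_succ_cons]

-- the segment sums taken between adjacent boundaries
def pvPairs (bs : List Int) (ys : List Int) : List Int :=
  (bs.zip bs.tail).map (fun p => (PySem.List.slice ys (some (p.1 + 1)) (some p.2)).sum)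

lemma pvPairs_cons2 (a b : Int) (bs ys : List Int) :
    pvPairs (a :: b :: bs) ys
      = (PySem.List.slice ys (some (a + 1)) (some b)).sum :: pvPairs (b :: bs) ys := rfl

lemma pvTotB_eq_pairs (xs : List Int) :
    pvTotB xs = pvPairs ((-1 : Int) :: (pvZeros xs 0 ++ [(xs.length : Int)])) xs := rfl

-- shifting all boundaries by one matches prepending an element, pairwise
lemma pvShift (xs : List Int) (c : Int) :
    ∀ (bs : List Int), (∀ b ∈ bs, -1 ≤ b) → (∀ b ∈ bs.tail, 0 ≤ b) →
      pvPairs (bs.map (· + 1)) (c :: xs) = pvPairs bs xs := by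
  intro bs
  induction bs with
  | nil => intro _ _; rfl
  | cons a rest ih =>
    intro h1 h2
    cases rest with
    | nil => rfl
    | cons b rest' =>
      have ha : -1 ≤ a := h1 a (by simp)
      have hb : 0 ≤ b := h2 b (by simp)
      have hrec := ih (fun x hx => h1 x (List.mem_cons_of_mem _ hx))
        (fun x hx => h2 x (List.mem_cons_of_mem _ hx))
      simp only [List.map_cons] at hrec ⊢
      rw [pvPairs_cons2, pvPairs_cons2, hrec]
      congr 1
      rw [show a + 1 + 1 = (a + 1) + 1 from rfl,
          pvSliceCons xs c (a + 1) b (by omega) hb]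

lemma pvTotB_nil : pvTotB [] = [0] := by decide

lemma pvTotB_cons (c : Int) (xs : List Int) :
    pvTotB (c :: xs) = if c = 0 then 0 :: pvTotB xs else pvAddFirst c (pvTotB xs) := by
  have hZ : ∀ z ∈ pvZeros xs 0, (0 : Int) ≤ z := pvZeros_nonneg xs 0
  have hb1 : ∀ b ∈ ((-1 : Int) :: (pvZeros xs 0 ++ [(xs.length : Int)])), -1 ≤ b := by
    intro b hb
    rcases List.mem_cons.mp hb with rfl | hb
    · exact le_refl _
    · rcases List.mem_append.mp hb with h | h
      · have := hZ b h; omega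
      · simp only [List.mem_singleton] at h; omega
  have hb2 : ∀ b ∈ ((-1 : Int) :: (pvZeros xs 0 ++ [(xs.length : Int)])).tail, 0 ≤ b := by
    intro b hb
    simp only [List.tail_cons] at hb
    rcases List.mem_append.mp hb with h | h
    · exact hZ b h
    · simp only [List.mem_singleton] at h; omega
  have hbnds : pvZeros (c :: xs) 0 ++ [((c :: xs).length : Int)]
      = (if c = 0 then [(0 : Int)] else [])
        ++ (pvZeros xs 0 ++ [(xs.length : Int)]).map (· + 1) := by
    rw [pvZeros_cons, List.map_append]
    push_cast [List.length_cons]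
    simp
  by_cases hc : c = 0
  · simp only [hc] at hbnds ⊢
    rw [pvTotB_eq_pairs, hbnds]
    simp only [if_true]
    have hmap : (0 : Int) :: ((pvZeros xs 0 ++ [(xs.length : Int)]).map (· + 1))
        = ((-1 : Int) :: (pvZeros xs 0 ++ [(xs.length : Int)])).map (· + 1) := by
      simp
    rw [List.singleton_append, pvPairs_cons2, hmap,
        pvShift xs 0 _ hb1 hb2, ← pvTotB_eq_pairs]
    have hempty : PySem.List.slice ((0 : Int) :: xs) (some ((-1 : Int) + 1)) (some 0) = [] := by
      rw [show (-1 : Int) + 1 = 0 from by norm_num,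
          PySem.List.slice_toNat _ (by omega) (by omega)]
      simp
    rw [hempty]
    rfl
  · simp only [if_neg hc] at hbnds ⊢
    rw [pvTotB_eq_pairs, hbnds, List.nil_append]
    -- the old boundary tail is nonempty (it ends with the length)
    cases hZB : pvZeros xs 0 ++ [(xs.length : Int)] with
    | nil => simp at hZB
    | cons z0 zt =>
      have hz0 : 0 ≤ z0 := hb2 z0 (by rw [hZB]; simp)
      rw [List.map_cons, pvPairs_cons2,
          show (-1 : Int) + 1 = 0 from by norm_num,
          pvSliceConsHead xs c z0 hz0]
      have hsh := pvShift xs c ((-1 : Int) :: (pvZeros xs 0 ++ [(xs.length : Int)])) hb1 hb2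
      rw [hZB] at hsh
      simp only [List.map_cons, show (-1 : Int) + 1 = 0 from by norm_num] at hsh
      rw [pvPairs_cons2, pvPairs_cons2] at hsh
      injection hsh with _ htail
      -- peel the first pair off both sides of the shift equation
      rw [pvTotB_eq_pairs, hZB, pvPairs_cons2]
      simp only [pvAddFirst, List.sum_cons,
        show (-1 : Int) + 1 = 0 from by norm_num]
      rw [htail]

lemma pvTotB_eq_groups (xs : List Int) : pvTotB xs = pvGroups xs := by
  induction xs with
  | nil => rw [pvTotB_nil]; rfl
  | cons c xs ih =>
    rw [pvTotB_cons]
    by_cases hc : c = 0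
    · simp [hc, pvGroups, ih]
    · simp only [if_neg hc, pvGroups, ih]
      cases h : pvGroups xs with
      | nil => exact absurd h (pvGroups_ne_nil xs)
      | cons t ts => simp [pvAddFirst, Int.add_comm]

-- ===== VERDICT (by name: the statement is the Claim_ definition above) =====
theorem find_totals_spec : Claim_equal_find_totals := by
  intro calories _
  show find_totals calories = find_totals_alt calories
  unfold find_totals find_totals_alt
  have h1 : (fun (st : List Int × Int) c =>
      if c ≠ 0 then (st.1, st.2 + c) else (st.1 ++ [st.2], (0 : Int))) = pvStepA := rfl
  simp only [h1]
  rw [pvA_unsorted]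
  have hB : ((((-1 : Int) :: ((PySem.List.enumerate calories 0).filterMap
        (fun p => if p.2 = 0 then some p.1 else none) ++ [(calories.length : Int)])).zip
        (((-1 : Int) :: ((PySem.List.enumerate calories 0).filterMap
        (fun p => if p.2 = 0 then some p.1 else none) ++ [(calories.length : Int)])).tail)).map
        (fun p => (PySem.List.slice calories (some (p.1 + 1)) (some p.2)).sum))
      = pvTotB calories := rfl
  rw [hB, pvTotB_eq_groups]
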